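-- pv_equiv track=rewrite | github.com/Saikat-SS24/Problem_Solving | GeeksforGeeks/Game_of_XOR.py | gameOfXor
-- ===== SOURCE A (Python) =====
-- def gameOfXor(N , A):
--     # code here
--     res = 0
--     for i, e in enumerate(A):
--         if (i+1)*(N-i)%2 == 0:
--             res ^= 0
--         else:
--             res ^= e
--     return res
-- ===== SOURCE B (Python) =====
-- def gameOfXor(N, A):
--     # (i+1)*(N-i) is odd iff i is even and N is odd, so: shortcut for even N,
--     # otherwise one pass XOR-ing only every other element (a toggle flag).
--     if N % 2 == 0:
--         return 0
--     res = 0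
--     take = True
--     for e in A:
--         if take:
--             res ^= e
--         take = not take
--     return res
-- ===== Notes on version B (the rewrite author's own statement) =====
-- stated objective: simpler
-- what changed: Replaces the per-element product-parity test (i+1)*(N-i)%2 with the closed-form parity fact: for even N return 0 immediately, for odd N XOR the even-indexed elements via a single toggle-flag pass.
import Mathlib
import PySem

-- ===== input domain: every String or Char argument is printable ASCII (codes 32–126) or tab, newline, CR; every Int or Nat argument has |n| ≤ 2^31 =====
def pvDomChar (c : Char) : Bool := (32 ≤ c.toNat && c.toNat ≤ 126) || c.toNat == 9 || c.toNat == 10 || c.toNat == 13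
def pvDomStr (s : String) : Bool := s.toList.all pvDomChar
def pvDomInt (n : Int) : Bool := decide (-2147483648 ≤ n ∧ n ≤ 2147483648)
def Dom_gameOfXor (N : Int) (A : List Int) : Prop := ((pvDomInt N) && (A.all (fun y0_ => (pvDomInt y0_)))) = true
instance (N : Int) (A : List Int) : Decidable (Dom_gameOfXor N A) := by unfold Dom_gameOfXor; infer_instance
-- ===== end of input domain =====

-- B replaces A's per-element product-parity test by the closed-form parity fact
-- (even N → 0; odd N → XOR of even-indexed elements via a toggle flag): simpler.


-- ===== PORT A =====
def gameOfXor (N : Int) (A : List Int) : Int :=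
  (PySem.List.enumerate A 0).foldl
    (fun res ie =>
      if PySem.Int.mod ((ie.1 + 1) * (N - ie.1)) 2 = 0 then PySem.Int.bxor res 0
      else PySem.Int.bxor res ie.2) 0

-- ===== PORT B =====
def gameOfXor_alt (N : Int) (A : List Int) : Int :=
  if PySem.Int.mod N 2 = 0 then 0
  else (A.foldl
    (fun (st : Int × Bool) e => (if st.2 then PySem.Int.bxor st.1 e else st.1, !st.2))
    (0, true)).1

-- ===== PRECONDITION & SPEC =====
def Spec_gameOfXor (N : Int) (A : List Int) (out : Int) : Prop := out = gameOfXor_alt N A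
instance (N : Int) (A : List Int) (out : Int) : Decidable (Spec_gameOfXor N A out) := by unfold Spec_gameOfXor; infer_instance

-- ===== CLAIM (what is proved, stated in full; the proofs are below) =====
def Claim_equal_gameOfXor : Prop := ∀ (N : Int) (A : List Int), Dom_gameOfXor N A → Spec_gameOfXor N A (gameOfXor N A)

-- ===== LEMMAS AND PROOFS =====

-- For even N the weight (i+1)*(N-i) is always even, so A's fold never changes res.
theorem gameOfXor_fold_even (N : Int) (hN : (2:Int) ∣ N) :
    ∀ (A : List Int) (s res : Int),
      (PySem.List.enumerate A s).foldl
        (fun res ie =>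
          if PySem.Int.mod ((ie.1 + 1) * (N - ie.1)) 2 = 0 then PySem.Int.bxor res 0
          else PySem.Int.bxor res ie.2) res = res := by
  intro A
  induction A with
  | nil => intro s res; simp [PySem.List.enumerate]
  | cons x xs ih =>
    intro s res
    rw [PySem.List.enumerate_cons, List.foldl_cons]
    have hcond : (2:Int) ∣ (s + 1) * (N - s) := by
      rw [Int.prime_two.dvd_mul]
      omega
    simpa [hcond] using ih (s + 1) res

-- For odd N the weight is odd exactly at even indices, so A's fold is B's toggle fold.
theorem gameOfXor_fold_odd (N : Int) (hN : ¬ (2:Int) ∣ N) :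
    ∀ (A : List Int) (s res : Int) (b : Bool), b = decide ((2:Int) ∣ s) →
      (PySem.List.enumerate A s).foldl
        (fun res ie =>
          if PySem.Int.mod ((ie.1 + 1) * (N - ie.1)) 2 = 0 then PySem.Int.bxor res 0
          else PySem.Int.bxor res ie.2) res
      = (A.foldl
          (fun (st : Int × Bool) e => (if st.2 then PySem.Int.bxor st.1 e else st.1, !st.2))
          (res, b)).1 := by
  intro A
  induction A with
  | nil => intro s res b hb; simp [PySem.List.enumerate]
  | cons x xs ih =>
    intro s res b hb
    rw [PySem.List.enumerate_cons, List.foldl_cons, List.foldl_cons]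
    have hiff : (2:Int) ∣ (s + 1) * (N - s) ↔ ¬ (2:Int) ∣ s := by
      rw [Int.prime_two.dvd_mul]
      omega
    by_cases hs : (2:Int) ∣ s
    · have hcond₁ : ¬ (2:Int) ∣ (s + 1) * (N - s) := fun h => (hiff.mp h) hs
      simpa [hcond₁, hb, hs] using ih (s + 1) (PySem.Int.bxor res x) false (by simp; omega)
    · have hcond₂ : (2:Int) ∣ (s + 1) * (N - s) := hiff.mpr hs
      simpa [hcond₂, hb, hs] using ih (s + 1) res true (by simp; omega)

-- ===== VERDICT (by name: the statement is the Claim_ definition above) =====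
theorem gameOfXor_spec : Claim_equal_gameOfXor := by
  intro N A _
  unfold Spec_gameOfXor gameOfXor gameOfXor_alt
  by_cases h2 : PySem.Int.mod N 2 = 0
  · rw [if_pos h2]
    exact gameOfXor_fold_even N ((PySem.Int.mod_eq_zero_iff_dvd N 2).mp h2) A 0 0
  · rw [if_neg h2]
    refine gameOfXor_fold_odd N (fun hd => h2 ((PySem.Int.mod_eq_zero_iff_dvd N 2).mpr hd)) A 0 0 true ?_
    simp
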